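-- pv_equiv track=rewrite | github.com/raj713335/LeetCode | Medium/1772 Sort Features by Popularity.py | sortFeatures
-- ===== SOURCE A (Python) =====
-- from typing import List
--
-- def sortFeatures(features: List[str], responses: List[str]) -> List[str]:
--
--     dictx = {}
--
--     for each in features:
--         dictx[each] = 0
--
--     for each in responses:
--         for val in set(list(map(str, each.split(" ")))):
--             if val in dictx:
--                 dictx[val] += 1
--
--     dictx = sorted(dictx.items(), key = lambda x: x[1], reverse=True)
--
--     ans = []
--
--     for each in dictx:
--         ans.append(each[0])
--
--     return ans
-- ===== SOURCE B (Python) =====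
-- def sortFeatures(features, responses):
--     # Different algorithm: one pass tallies ALL words across response
--     # word-sets into a frequency dict (no pre-seeding, no membership guard),
--     # features are deduped to first occurrence with a seen-set, each unique
--     # feature's count is a single tally lookup, and the answer is emitted by
--     # a counting/bucket pass from len(responses) down to 0 (no comparison sort).
--     tally = {}
--     for r in responses:
--         for w in set(r.split(" ")):
--             tally[w] = tally.get(w, 0) + 1
--     seen = set()
--     uniq = []
--     for f in features:
--         if f not in seen:
--             seen.add(f)
--             uniq.append(f)
--     buckets = {}
--     for f in uniq:
--         buckets.setdefault(tally.get(f, 0), []).append(f)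
--     ans = []
--     for c in range(len(responses), -1, -1):
--         ans += buckets.get(c, [])
--     return ans
-- ===== Notes on version B (the rewrite author's own statement) =====
-- stated objective: alternative
-- what changed: B tallies all response words into a frequency dict in one unguarded pass (instead of pre-seeding a dict with features and guarding increments), dedups features to first occurrence with a seen-set, buckets each unique feature by a single tally lookup, and replaces the comparison sort by concatenating buckets from len(responses) down to 0, preserving first-occurrence tie order.
import Mathlib
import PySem

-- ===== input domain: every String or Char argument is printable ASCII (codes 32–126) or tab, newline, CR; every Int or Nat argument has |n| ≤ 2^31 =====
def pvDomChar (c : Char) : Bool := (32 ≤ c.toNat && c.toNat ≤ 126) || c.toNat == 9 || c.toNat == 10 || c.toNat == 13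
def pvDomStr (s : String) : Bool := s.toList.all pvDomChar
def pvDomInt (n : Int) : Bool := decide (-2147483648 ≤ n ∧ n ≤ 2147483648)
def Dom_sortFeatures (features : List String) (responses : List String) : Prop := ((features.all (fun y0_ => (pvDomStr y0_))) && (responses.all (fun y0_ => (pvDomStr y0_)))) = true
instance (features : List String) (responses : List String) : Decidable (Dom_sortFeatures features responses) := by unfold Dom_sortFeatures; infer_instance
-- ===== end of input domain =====

-- B drops A's dict and comparison sort: it dedups features into a plain list, counts each
-- feature against precomputed response word-sets, and emits features grouped by count from
-- len(responses) down to 0 (objective: alternative algorithm, same observable result).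

-- ===== PORT A =====
def sortFeatures (features : List String) (responses : List String) : List String :=
  let d0 : PySem.Dict String Int := features.foldl (fun d f => d.insert f 0) PySem.Dict.empty
  let d1 : PySem.Dict String Int := responses.foldl (fun d r =>
      (PySem.Set.ofList ((PySem.Str.split? r " ").getD [])).foldl
        (fun d v => if d.contains v then d.modify v 0 (· + 1) else d) d) d0
  let sortedItems := PySem.List.sorted d1.items (fun x => x.2) true
  sortedItems.foldl (fun ans p => ans ++ [p.1]) []

-- ===== PORT B =====
def sortFeatures_alt (features : List String) (responses : List String) : List String :=
  let tally : PySem.Dict String Int := responses.foldl (fun t r =>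
      (PySem.Set.ofList ((PySem.Str.split? r " ").getD [])).foldl
        (fun t w => t.modify w 0 (· + 1)) t) PySem.Dict.empty
  let uniq : List String :=
    (features.foldl (fun (p : List String × PySem.Set String) f =>
        if PySem.Set.contains p.2 f then p else (p.1 ++ [f], PySem.Set.add p.2 f))
      ([], PySem.Set.empty)).1
  let buckets : PySem.Dict Int (List String) :=
    uniq.foldl (fun b f => b.modify (tally.getD f 0) [] (· ++ [f])) PySem.Dict.empty
  (PySem.List.pyRange (responses.length : Int) (-1) (-1)).foldl
    (fun ans c => ans ++ buckets.getD c []) []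

-- ===== PRECONDITION & SPEC =====
def Spec_sortFeatures (features : List String) (responses : List String) (out : List String) : Prop := out = sortFeatures_alt features responses
instance (features : List String) (responses : List String) (out : List String) : Decidable (Spec_sortFeatures features responses out) := by unfold Spec_sortFeatures; infer_instance

-- ===== CLAIM (what is proved, stated in full; the proofs are below) =====
def Claim_equal_sortFeatures : Prop := ∀ (features : List String) (responses : List String), Dom_sortFeatures features responses → Spec_sortFeatures features responses (sortFeatures features responses)

-- ===== LEMMAS AND PROOFS =====

theorem pvInsertBy_cons {α : Type} (before : α → α → Bool) (x y : α) (ys : List α) :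
    PySem.List.insertBy before x (y :: ys) =
      if before x y then x :: y :: ys else y :: PySem.List.insertBy before x ys := by
  rfl

theorem pvInsertBy_append_not {α : Type} (before : α → α → Bool) (x : α) (l r : List α)
    (h : ∀ y ∈ l, before x y = false) :
    PySem.List.insertBy before x (l ++ r) = l ++ PySem.List.insertBy before x r := by
  induction l with
  | nil => simp
  | cons y l ih =>
    rw [List.cons_append, pvInsertBy_cons, h y (by simp)]
    simp [ih (fun z hz => h z (by simp [hz]))]

theorem pvInsertBy_all_true {α : Type} (before : α → α → Bool) (x : α) (r : List α)
    (h : ∀ y ∈ r, before x y = true) :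
    PySem.List.insertBy before x r = x :: r := by
  cases r with
  | nil => rfl
  | cons y ys => simp [pvInsertBy_cons, h y (by simp)]

theorem pvFlatMap_congr {α β : Type} (l : List α) (f g : α → List β)
    (h : ∀ a ∈ l, f a = g a) : l.flatMap f = l.flatMap g := by
  induction l with
  | nil => rfl
  | cons a l ih => simp [List.flatMap_cons, h a (by simp), ih (fun b hb => h b (by simp [hb]))]

theorem pvInsert_bucket (cs : List Int) (g : Int → List (String × Int)) (x : String × Int)
    (hg : ∀ c, ∀ p ∈ g c, p.2 = c) (hp : cs.Pairwise (fun a b => b < a)) (hx : x.2 ∈ cs) :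
    PySem.List.insertBy (fun a b => decide (b.2 < a.2)) x (cs.flatMap g) =
      cs.flatMap (fun c => g c ++ if x.2 == c then [x] else []) := by
  induction cs with
  | nil => simp at hx
  | cons c cs ih =>
    rw [List.pairwise_cons] at hp
    rw [List.flatMap_cons, List.flatMap_cons]
    by_cases hxc : x.2 = c
    · have h1 : ∀ y ∈ g c, (fun a b => decide ((b : String × Int).2 < a.2)) x y = false := by
        intro y hy; simp [hg c y hy, hxc]
      rw [pvInsertBy_append_not _ _ _ _ h1]
      have h2 : PySem.List.insertBy (fun a b => decide (b.2 < a.2)) x (cs.flatMap g) = x :: cs.flatMap g := by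
        apply pvInsertBy_all_true
        intro y hy
        rcases List.mem_flatMap.mp hy with ⟨c', hc', hy'⟩
        simp [hg c' y hy', hxc, hp.1 c' hc']
      rw [h2]
      have h3 : cs.flatMap (fun c' => g c' ++ if x.2 == c' then [x] else []) = cs.flatMap g := by
        apply pvFlatMap_congr
        intro c' hc'
        have : x.2 ≠ c' := by have := hp.1 c' hc'; omega
        simp [this]
      rw [h3, if_pos (by simp [hxc])]
      simp
    · have hx' : x.2 ∈ cs := (List.mem_cons.mp hx).resolve_left hxc
      have h1 : ∀ y ∈ g c, (fun a b => decide ((b : String × Int).2 < a.2)) x y = false := by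
        intro y hy
        have hyc := hg c y hy
        have : x.2 < c := hp.1 _ hx'
        simp [hyc]; omega
      rw [pvInsertBy_append_not _ _ _ _ h1, ih hp.2 hx', if_neg (by simp [hxc])]
      simp

theorem pvSorted_rev_buckets (L : List (String × Int)) (cs : List Int)
    (hp : cs.Pairwise (fun a b => b < a)) (hcov : ∀ p ∈ L, p.2 ∈ cs) :
    PySem.List.sorted L (fun p => p.2) true =
      cs.flatMap (fun c => L.filter (fun p => p.2 == c)) := by
  rw [PySem.List.sorted_rev_eq_foldl_insertBy]
  induction L using List.reverseRecOn with
  | nil => simp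
  | append_singleton L x ih =>
    rw [List.foldl_append, List.foldl_cons, List.foldl_nil]
    rw [ih (fun p hp' => hcov p (by simp [hp']))]
    rw [pvInsert_bucket cs _ x (fun c p hpc => by simpa using (List.mem_filter.mp hpc).2) hp
      (hcov x (by simp))]
    apply pvFlatMap_congr
    intro c hc
    rw [List.filter_append, List.filter_singleton]
    simp

theorem pvPyRange_down (m : Nat) :
    PySem.List.pyRange (m : Int) (-1) (-1) = (List.range (m + 1)).map (fun k : Nat => (m : Int) - (k : Int)) := by
  unfold PySem.List.pyRange
  rw [if_neg (by norm_num)]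
  have h1 : ¬ ((0:Int) < -1) := by norm_num
  have h2 : (-1:Int) < (m:Int) := by omega
  rw [if_neg h1, if_pos h2]
  have h3 : (((m:Int) - -1 + -(-1) - 1) / -(-1)).toNat = m + 1 := by
    norm_num
  rw [h3]
  show List.map (fun k : Nat => (m : Int) + -1 * k) (List.range (m + 1)) = _
  apply List.map_congr_left
  intro k hk
  omega

theorem pvPyRange_down_pairwise (m : Nat) :
    (PySem.List.pyRange (m : Int) (-1) (-1)).Pairwise (fun a b => b < a) := by
  rw [pvPyRange_down]
  refine List.Pairwise.map _ ?_ (List.pairwise_lt_range (n := m + 1))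
  intro a b hab
  omega

theorem pvPyRange_down_mem (m : Nat) (c : Int) (h0 : 0 ≤ c) (h1 : c ≤ m) :
    c ∈ PySem.List.pyRange (m : Int) (-1) (-1) := by
  rw [pvPyRange_down]
  refine List.mem_map.mpr ⟨((m:Int) - c).toNat, List.mem_range.mpr (by omega), by omega⟩

-- fold shapes
theorem pvFoldl_append_fst (l : List (String × Int)) (a0 : List String) :
    l.foldl (fun a p => a ++ [p.1]) a0 = a0 ++ l.map (fun p => p.1) := by
  induction l generalizing a0 with
  | nil => simp
  | cons p l ih => simp [ih]

theorem pvFoldl_flat (cs : List Int) (g : Int → List String) (a0 : List String) :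
    cs.foldl (fun a c => a ++ g c) a0 = a0 ++ cs.flatMap g := by
  induction cs generalizing a0 with
  | nil => simp
  | cons c cs ih => simp [ih]

-- ===== A-side dict characterizations =====
theorem pvContains_stepA (d : PySem.Dict String Int) (v x : String) :
    ((if d.contains v then d.modify v 0 (· + 1) else d).contains x) = d.contains x := by
  by_cases h : d.contains v
  · rw [if_pos h, PySem.Dict.contains_modify]
    by_cases hx : x = v
    · subst hx; simp [h]
    · simp [hx]
  · rw [if_neg h]

theorem pvContains_innerFold (l : List String) (d : PySem.Dict String Int) (x : String) :
    ((l.foldl (fun d v => if d.contains v then d.modify v 0 (· + 1) else d) d).contains x) = d.contains x := by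
  induction l generalizing d with
  | nil => rfl
  | cons v l ih => rw [List.foldl_cons, ih, pvContains_stepA]

theorem pvGetD_innerFold (l : List String) (hnd : l.Nodup) (d : PySem.Dict String Int) (x : String) :
    ((l.foldl (fun d v => if d.contains v then d.modify v 0 (· + 1) else d) d).getD x 0) =
      d.getD x 0 + (if x ∈ l ∧ d.contains x then 1 else 0) := by
  induction l generalizing d with
  | nil => simp
  | cons v l ih =>
    rw [List.foldl_cons, ih hnd.of_cons]
    by_cases hc : d.contains v
    · rw [if_pos hc]
      by_cases hx : x = v
      · subst hx
        have hxl : x ∉ l := (List.nodup_cons.mp hnd).1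
        rw [PySem.Dict.getD_modify]
        simp [hxl, hc]
      · rw [PySem.Dict.getD_modify, if_neg hx, PySem.Dict.contains_modify]
        have : (x == v) = false := by simp [hx]
        simp only [this, Bool.false_or]
        by_cases hxl : x ∈ l <;> simp [hxl, List.mem_cons, hx]
    · rw [if_neg hc]
      by_cases hx : x = v
      · subst hx; simp [hc]
      · simp [List.mem_cons, hx]

-- the canonical per-feature count
def pvCnt (responses : List String) (f : String) : Int :=
  (responses.map (fun r => PySem.Set.ofList ((PySem.Str.split? r " ").getD []))).foldl
    (fun n ws => if PySem.Set.contains ws f then n + 1 else n) 0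

theorem pvCount_shift (l : List (PySem.Set String)) (f : String) (n0 : Int) :
    l.foldl (fun n ws => if PySem.Set.contains ws f then n + 1 else n) n0 =
      n0 + l.foldl (fun n ws => if PySem.Set.contains ws f then n + 1 else n) 0 := by
  induction l generalizing n0 with
  | nil => simp
  | cons ws l ih =>
    rw [List.foldl_cons, List.foldl_cons, ih, ih (if PySem.Set.contains ws f then 0 + 1 else 0)]
    split_ifs <;> ring

theorem pvCnt_cons (r : String) (rs : List String) (f : String) :
    pvCnt (r :: rs) f =
      (if PySem.Set.contains (PySem.Set.ofList ((PySem.Str.split? r " ").getD [])) f then 1 else 0)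
        + pvCnt rs f := by
  unfold pvCnt
  rw [List.map_cons, List.foldl_cons, pvCount_shift]
  split_ifs <;> ring

theorem pvCnt_nonneg (rs : List String) (f : String) : 0 ≤ pvCnt rs f := by
  induction rs with
  | nil => simp [pvCnt]
  | cons r rs ih =>
    rw [pvCnt_cons]
    split_ifs <;> omega

theorem pvCnt_le (rs : List String) (f : String) : pvCnt rs f ≤ rs.length := by
  induction rs with
  | nil => simp [pvCnt]
  | cons r rs ih =>
    rw [pvCnt_cons]
    simp only [List.length_cons]
    push_cast
    split_ifs <;> omega

theorem pvGetD_outerFold (rs : List String) (d : PySem.Dict String Int) (x : String) :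
    ((rs.foldl (fun d r =>
        (PySem.Set.ofList ((PySem.Str.split? r " ").getD [])).foldl
          (fun d v => if d.contains v then d.modify v 0 (· + 1) else d) d) d).getD x 0) =
      d.getD x 0 + (if d.contains x then pvCnt rs x else 0) := by
  induction rs generalizing d with
  | nil => simp [pvCnt]
  | cons r rs ih =>
    rw [List.foldl_cons, ih, pvGetD_innerFold _ (PySem.Set.nodup_ofList _), pvContains_innerFold,
      pvCnt_cons]
    have hmem : x ∈ PySem.Set.ofList ((PySem.Str.split? r " ").getD []) ↔
        PySem.Set.contains (PySem.Set.ofList ((PySem.Str.split? r " ").getD [])) x = true := by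
      simp [PySem.Set.contains]
    by_cases hc : d.contains x
    · simp only [hc, and_true, if_true, hmem]
      split_ifs <;> ring
    · simp [hc]

theorem pvKeys_stepA (d : PySem.Dict String Int) (v : String) :
    ((if d.contains v then d.modify v 0 (· + 1) else d).keys) = d.keys := by
  by_cases h : d.contains v
  · rw [if_pos h, PySem.Dict.keys_modify, PySem.Dict.keys_insert_of_contains _ _ h]
  · rw [if_neg h]

theorem pvKeys_innerFold (l : List String) (d : PySem.Dict String Int) :
    ((l.foldl (fun d v => if d.contains v then d.modify v 0 (· + 1) else d) d).keys) = d.keys := by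
  induction l generalizing d with
  | nil => rfl
  | cons v l ih => rw [List.foldl_cons, ih, pvKeys_stepA]

theorem pvKeys_outerFold (rs : List String) (d : PySem.Dict String Int) :
    ((rs.foldl (fun d r =>
        (PySem.Set.ofList ((PySem.Str.split? r " ").getD [])).foldl
          (fun d v => if d.contains v then d.modify v 0 (· + 1) else d) d) d).keys) = d.keys := by
  induction rs generalizing d with
  | nil => rfl
  | cons r rs ih => rw [List.foldl_cons, ih, pvKeys_innerFold]

theorem pvKeys_d0 (features : List String) :
    ((features.foldl (fun d f => d.insert f 0) (PySem.Dict.empty : PySem.Dict String Int)).keys)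
      = PySem.Set.ofList features := by
  rw [PySem.Dict.keys_foldl_insert features (fun _ _ => (0 : Int)), PySem.Dict.keys_empty,
    PySem.Set.ofList_eq_foldl]
  rfl

theorem pvGetD_d0 (l : List String) (d : PySem.Dict String Int) (h : ∀ y, d.getD y 0 = 0)
    (x : String) : (l.foldl (fun d f => d.insert f 0) d).getD x 0 = 0 := by
  induction l generalizing d with
  | nil => exact h x
  | cons f l ih =>
    rw [List.foldl_cons]
    apply ih
    intro y
    rw [PySem.Dict.getD_insert]
    split_ifs with hy
    · rfl
    · exact h y

theorem pvCounts_items (features responses : List String) (d : PySem.Dict String Int)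
    (hkeys : d.keys = PySem.Set.ofList features) (hnodup : d.keys.Nodup)
    (hzero : ∀ y, d.getD y 0 = 0) :
    ((responses.foldl (fun d r =>
        (PySem.Set.ofList ((PySem.Str.split? r " ").getD [])).foldl
          (fun d v => if d.contains v then d.modify v 0 (· + 1) else d) d) d).items)
      = (PySem.Set.ofList features).map (fun f => (f, pvCnt responses f)) := by
  rw [PySem.Dict.items_eq_map_keys _ (by rw [pvKeys_outerFold]; exact hnodup) 0,
    pvKeys_outerFold, hkeys]
  apply List.map_congr_left
  intro f hf
  have hc : d.contains f = true :=
    (PySem.Dict.contains_iff_mem_keys _ _).mpr (by rw [hkeys]; exact hf)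
  rw [pvGetD_outerFold, hzero, if_pos hc, zero_add]

-- ===== B-side lemmas =====
theorem pvUniq_pair (l : List String) (s : PySem.Set String) :
    (l.foldl (fun (p : List String × PySem.Set String) f =>
        if PySem.Set.contains p.2 f then p else (p.1 ++ [f], PySem.Set.add p.2 f)) (s, s)).1 =
      l.foldl PySem.Set.add s := by
  induction l generalizing s with
  | nil => rfl
  | cons f l ih =>
    rw [List.foldl_cons, List.foldl_cons]
    by_cases h : PySem.Set.contains s f
    · have hadd : PySem.Set.add s f = s := by simp [PySem.Set.add, PySem.Set.contains] at h ⊢; simp [h]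
      simp only [h, if_true, hadd]
      exact ih s
    · have h' : PySem.Set.contains s f = false := Bool.eq_false_iff.mpr h
      have hadd : PySem.Set.add s f = s ++ [f] := by
        simp only [PySem.Set.add]
        rw [if_neg (by simp [PySem.Set.contains] at h' ⊢; exact h')]
      simp only [h', Bool.false_eq_true, if_false, hadd]
      exact ih (s ++ [f])

theorem pvUniq_eq_ofList (features : List String) :
    (features.foldl (fun (p : List String × PySem.Set String) f =>
        if PySem.Set.contains p.2 f then p else (p.1 ++ [f], PySem.Set.add p.2 f))
      ([], PySem.Set.empty)).1 = PySem.Set.ofList features := by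
  rw [PySem.Set.ofList_eq_foldl]
  exact pvUniq_pair features PySem.Set.empty

theorem pvTally_getD (rs : List String) (d : PySem.Dict String Int) (x : String) :
    ((rs.foldl (fun t r =>
        (PySem.Set.ofList ((PySem.Str.split? r " ").getD [])).foldl
          (fun t w => t.modify w 0 (· + 1)) t) d).getD x 0) =
      d.getD x 0 + pvCnt rs x := by
  induction rs generalizing d with
  | nil => simp [pvCnt]
  | cons r rs ih =>
    rw [List.foldl_cons, ih, PySem.Dict.getD_foldl_modify_add_one, pvCnt_cons]
    have hnd := PySem.Set.nodup_ofList ((PySem.Str.split? r " ").getD [])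
    by_cases hm : x ∈ PySem.Set.ofList ((PySem.Str.split? r " ").getD [])
    · rw [List.count_eq_one_of_mem hnd hm]
      have hc : PySem.Set.contains (PySem.Set.ofList ((PySem.Str.split? r " ").getD [])) x = true := by
        simpa [PySem.Set.contains] using hm
      rw [if_pos hc]
      push_cast
      ring
    · rw [List.count_eq_zero_of_not_mem hm]
      have hc : PySem.Set.contains (PySem.Set.ofList ((PySem.Str.split? r " ").getD [])) x = false := by
        simpa [PySem.Set.contains] using hm
      rw [if_neg (by simp; simpa [PySem.Set.mem_ofList] using hm)]
      push_cast
      ring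

theorem pvBucketsF_getD (l : List String) (g : String → Int)
    (d : PySem.Dict Int (List String)) (c : Int) :
    ((l.foldl (fun b f => b.modify (g f) [] (· ++ [f])) d).getD c []) =
      d.getD c [] ++ l.filter (fun f => g f == c) := by
  induction l generalizing d with
  | nil => simp
  | cons f l ih =>
    rw [List.foldl_cons, ih, PySem.Dict.getD_modify]
    by_cases h : g f = c
    · rw [List.filter_cons_of_pos (by simp [h]), if_pos h.symm, h]
      simp
    · rw [List.filter_cons_of_neg (by simp [h]), if_neg (fun hc => h hc.symm)]

-- ===== VERDICT (by name: the statement is the Claim_ definition above) =====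
theorem sortFeatures_spec : Claim_equal_sortFeatures := by
  intro features responses _
  unfold Spec_sortFeatures
  simp only [sortFeatures, sortFeatures_alt]
  rw [pvCounts_items features responses _ (pvKeys_d0 features)
    (PySem.Dict.nodup_keys_foldl_insert features (fun _ _ => (0 : Int)) _ PySem.Dict.nodup_keys_empty)
    (pvGetD_d0 features _ (fun y => PySem.Dict.getD_empty y 0))]
  rw [pvUniq_eq_ofList]
  have hcnt : ∀ f : String, ((responses.foldl (fun t r =>
      (PySem.Set.ofList ((PySem.Str.split? r " ").getD [])).foldl
        (fun t w => t.modify w 0 (· + 1)) t) (PySem.Dict.empty : PySem.Dict String Int)).getD f 0)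
      = pvCnt responses f := by
    intro f
    rw [pvTally_getD]
    simp
  simp only [hcnt]
  set L := (PySem.Set.ofList features).map (fun f => (f, pvCnt responses f)) with hL
  set cs := PySem.List.pyRange (responses.length : Int) (-1) (-1) with hcs
  rw [pvSorted_rev_buckets L cs (pvPyRange_down_pairwise _) ?hcov]
  case hcov =>
    intro p hp
    rcases List.mem_map.mp hp with ⟨f, hf, rfl⟩
    exact pvPyRange_down_mem _ _ (pvCnt_nonneg _ _) (pvCnt_le _ _)
  rw [pvFoldl_append_fst, pvFoldl_flat, List.nil_append, List.nil_append, List.map_flatMap]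
  apply pvFlatMap_congr
  intro c hc
  rw [pvBucketsF_getD, PySem.Dict.getD_empty, List.nil_append, hL, List.filter_map]
  simp only [Function.comp_def, List.map_map]
  exact List.map_id'' (fun x => rfl) _
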